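-- pv_equiv track=rewrite | github.com/projectbtle/argXtract | argxtract/core/binary_operations.py | sign_extend
-- ===== SOURCE A (Python) =====
-- def sign_extend(value, total_bits=32):
--     bin_value = bin(int('1'+value, 16))[3:]
--     top_bit = bin_value[0]
--     length_bits = len(bin_value)
--     num_sign_bits = total_bits - length_bits
--     extended_bits = ''
--     for i in range(num_sign_bits):
--         extended_bits += top_bit
--     extended_bits += bin_value
--     extended_hex = '%0*x' % ((len(extended_bits) + 3) // 4, int(extended_bits, 2))
--     return extended_hex
-- ===== SOURCE B (Python) =====
-- def sign_extend(value, total_bits=32):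
--     bits = 4 * len(value)
--     n = int(value, 16)
--     sign = (n >> (bits - 1)) & 1
--     ext = total_bits - bits
--     if ext > 0:
--         if sign:
--             n += ((1 << ext) - 1) << bits
--         width = (total_bits + 3) // 4
--     else:
--         width = (bits + 3) // 4
--     return '%0*x' % (width, n)
-- ===== Notes on version B (the rewrite author's own statement) =====
-- stated objective: idiomatic
-- what changed: Replaces A's binary-string pipeline (build a bit string via bin(), prepend the top bit in a character-append loop, reparse with int(...,2)) by direct integer bit arithmetic: read the sign bit with a shift and add the sign-extension block as one number, no loop and no intermediate strings.
-- outside the precondition, e.g. on sign_extend('0_0', 8): A returns '00', B returns '000'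
import Mathlib
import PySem

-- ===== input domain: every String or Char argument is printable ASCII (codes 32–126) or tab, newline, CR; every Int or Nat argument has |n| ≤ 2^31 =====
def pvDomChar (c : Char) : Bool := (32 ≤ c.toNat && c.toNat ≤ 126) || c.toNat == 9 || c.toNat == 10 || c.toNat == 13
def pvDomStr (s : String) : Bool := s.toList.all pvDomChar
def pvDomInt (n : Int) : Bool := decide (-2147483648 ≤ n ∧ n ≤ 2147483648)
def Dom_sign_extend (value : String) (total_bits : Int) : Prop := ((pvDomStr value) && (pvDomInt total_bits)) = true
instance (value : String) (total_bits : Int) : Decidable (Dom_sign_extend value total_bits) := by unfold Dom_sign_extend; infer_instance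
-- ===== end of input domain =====

-- B replaces A's build-a-bit-string-and-reparse pipeline by direct integer bit arithmetic (no loop, no intermediate strings).

-- ===== PORT A =====

-- hex digit value, as used by int(_,16); junk (0) only outside Pre_ (Pre_ admits hex digits only)
def pvHexVal (c : Char) : Nat :=
  if 48 ≤ c.toNat ∧ c.toNat ≤ 57 then c.toNat - 48        -- '0'..'9'
  else if 97 ≤ c.toNat ∧ c.toNat ≤ 102 then c.toNat - 87  -- 'a'..'f'
  else if 65 ≤ c.toNat ∧ c.toNat ≤ 70 then c.toNat - 55   -- 'A'..'F'
  else 0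

-- int(s, 16) on a list of hex digits (exact on the Pre_ domain)
def pvParseHex (l : List Char) : Nat := l.foldl (fun a c => a * 16 + pvHexVal c) 0

def pvBitChar (b : Nat) : Char := if b = 1 then '1' else '0'

-- binary digits of m, MSB first ([] for 0)
def pvBinGo (m : Nat) : List Char :=
  if h : m = 0 then [] else pvBinGo (m / 2) ++ [pvBitChar (m % 2)]
decreasing_by exact Nat.div_lt_self (Nat.pos_of_ne_zero h) (by omega)

-- bin(m), as a character list ("0b…")
def pvBin (m : Nat) : List Char := '0' :: 'b' :: (if m = 0 then ['0'] else pvBinGo m)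

-- int(s, 2) on a list of '0'/'1' characters
def pvParseBin (l : List Char) : Nat := l.foldl (fun a c => a * 2 + (if c = '1' then 1 else 0)) 0

-- hex digits of m, MSB first, lowercase ([] for 0)
def pvHexGo (m : Nat) : List Char :=
  if h : m = 0 then []
  else pvHexGo (m / 16) ++ [if m % 16 < 10 then Char.ofNat (48 + m % 16) else Char.ofNat (87 + m % 16)]
decreasing_by exact Nat.div_lt_self (Nat.pos_of_ne_zero h) (by omega)

-- '%0*x' % (width, n): lowercase hex of n, zero-padded on the left to width
def pvHexPad (width : Int) (n : Nat) : String :=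
  let h := if n = 0 then ['0'] else pvHexGo n
  String.mk (List.replicate (width.toNat - h.length) '0' ++ h)

def sign_extend (value : String) (total_bits : Int) : String :=
  -- bin(int('1'+value,16))[3:]  ([3:] on a string = drop 3)
  let bin_value := (pvBin (pvParseHex ('1' :: value.toList))).drop 3
  let top_bit := bin_value.headD '0'   -- bin_value[0]; bin_value ≠ [] under Pre_
  let length_bits : Int := bin_value.length
  let num_sign_bits := total_bits - length_bits
  let extended_bits := (PySem.List.pyRange 0 num_sign_bits 1).foldl (fun acc _ => acc ++ [top_bit]) []
  let extended_bits := extended_bits ++ bin_value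
  pvHexPad (PySem.Int.floordiv ((extended_bits.length : Int) + 3) 4) (pvParseBin extended_bits)

-- ===== PORT B =====
def sign_extend_alt (value : String) (total_bits : Int) : String :=
  let bits : Int := 4 * value.toList.length   -- len(value)
  let n := pvParseHex value.toList          -- int(value, 16); exact on the Pre_ domain
  let sign := (n >>> (bits - 1).toNat) &&& 1  -- (n >> (bits-1)) & 1; bits ≥ 4 under Pre_
  let ext := total_bits - bits
  if ext > 0 then
    let n := if sign = 1 then n + ((1 <<< ext.toNat) - 1) <<< bits.toNat else n
    pvHexPad (PySem.Int.floordiv (total_bits + 3) 4) n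
  else
    pvHexPad (PySem.Int.floordiv (bits + 3) 4) n

-- ===== PRECONDITION & SPEC =====
def pvIsHexDig (c : Char) : Bool :=
  (48 ≤ c.toNat && c.toNat ≤ 57) || (97 ≤ c.toNat && c.toNat ≤ 102) || (65 ≤ c.toNat && c.toNat ≤ 70)

-- Pre_ excludes the empty string (A raises IndexError) and any non-hex-digit character: there A usually
-- raises ValueError, except for underscore digit separators like '0_0' (accepted by Python's int), where
-- the padding width is anybody's choice: A pads to the underscore-free digit count, B to the raw length
-- (so they can differ when the requested total_bits does not already dominate both widths).
def Pre_sign_extend (value : String) (total_bits : Int) : Prop :=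
  value.toList ≠ [] ∧ value.toList.all pvIsHexDig = true
instance (value : String) (total_bits : Int) : Decidable (Pre_sign_extend value total_bits) := by
  unfold Pre_sign_extend; infer_instance

def pvWitness_sign_extend : String × Int := ("f", 8)

def Spec_sign_extend (value : String) (total_bits : Int) (out : String) : Prop := out = sign_extend_alt value total_bits
instance (value : String) (total_bits : Int) (out : String) : Decidable (Spec_sign_extend value total_bits out) := by unfold Spec_sign_extend; infer_instance

-- ===== CLAIM (what is proved, stated in full; the proofs are below) =====
def Claim_equal_sign_extend : Prop := ∀ (value : String) (total_bits : Int), Dom_sign_extend value total_bits → Pre_sign_extend value total_bits → Spec_sign_extend value total_bits (sign_extend value total_bits)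

-- ===== LEMMAS AND PROOFS =====

-- fixed-width binary of n (k bits, MSB first): proof-side characterisation of A's bit string
def pvFixBits : Nat → Nat → List Char
  | 0, _ => []
  | k+1, n => pvFixBits k (n / 2) ++ [pvBitChar (n % 2)]

theorem pvFixBits_length (k n : Nat) : (pvFixBits k n).length = k := by
  induction k generalizing n with
  | zero => rfl
  | succ k ih => simp [pvFixBits, ih]

theorem pvHexVal_lt (c : Char) (h : pvIsHexDig c = true) : pvHexVal c < 16 := by
  unfold pvIsHexDig at h
  unfold pvHexVal
  simp only [Bool.or_eq_true, Bool.and_eq_true, decide_eq_true_eq] at h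
  split_ifs <;> omega

theorem pvParseHex_foldl (l : List Char) (a : Nat) :
    l.foldl (fun a c => a * 16 + pvHexVal c) a = a * 16 ^ l.length + pvParseHex l := by
  induction l generalizing a with
  | nil => simp [pvParseHex]
  | cons c l ih =>
      simp only [List.foldl_cons, List.length_cons]
      rw [ih, show pvParseHex (c :: l) = List.foldl (fun a c => a * 16 + pvHexVal c) (0 * 16 + pvHexVal c) l from rfl, ih]
      ring

theorem pvParseHex_lt (l : List Char) (h : l.all pvIsHexDig = true) :
    pvParseHex l < 16 ^ l.length := by
  induction l with
  | nil => simp [pvParseHex]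
  | cons c l ih =>
      simp only [List.all_cons, Bool.and_eq_true] at h
      have hc := pvHexVal_lt c h.1
      have hl := ih h.2
      have : pvParseHex (c :: l) = pvHexVal c * 16 ^ l.length + pvParseHex l := by
        rw [show pvParseHex (c :: l) = List.foldl (fun a c => a * 16 + pvHexVal c) (0 * 16 + pvHexVal c) l from rfl,
          pvParseHex_foldl]
        ring
      rw [this, List.length_cons, pow_succ]
      calc pvHexVal c * 16 ^ l.length + pvParseHex l
      _ < pvHexVal c * 16 ^ l.length + 16 ^ l.length := by omega
      _ = (pvHexVal c + 1) * 16 ^ l.length := by ring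
      _ ≤ 16 ^ l.length * 16 := by
          rw [Nat.mul_comm (16 ^ l.length) 16]
          exact Nat.mul_le_mul_right _ (by omega)

theorem pvBinGo_spec (k : Nat) : ∀ a n : Nat, 0 < a → n < 2 ^ k →
    pvBinGo (2 ^ k * a + n) = pvBinGo a ++ pvFixBits k n := by
  induction k with
  | zero =>
      intro a n _ hn
      interval_cases n
      simp [pvFixBits]
  | succ k ih =>
      intro a n ha hn
      have hp : (2:Nat) ^ (k+1) = 2 * 2 ^ k := by rw [pow_succ]; ring
      have key : 2 ^ (k+1) * a + n = 2 * (2 ^ k * a) + n := by rw [hp]; ring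
      have hm : 2 * (2 ^ k * a) + n ≠ 0 := by positivity
      rw [key, pvBinGo, dif_neg hm]
      have hdiv : (2 * (2 ^ k * a) + n) / 2 = 2 ^ k * a + n / 2 := by omega
      have hmod : (2 * (2 ^ k * a) + n) % 2 = n % 2 := by omega
      rw [hdiv, hmod, ih a (n / 2) ha (by omega), pvFixBits, List.append_assoc]

theorem pvHeadD_append_of_ne_nil {α : Type} (l l' : List α) (d : α) (h : l ≠ []) :
    (l ++ l').headD d = l.headD d := by
  cases l with
  | nil => exact absurd rfl h
  | cons a l => rfl

theorem pvFixBits_headD (k : Nat) : ∀ n : Nat, (pvFixBits (k + 1) n).headD '0' = pvBitChar (n / 2 ^ k % 2) := by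
  induction k with
  | zero => intro n; simp [pvFixBits]
  | succ k ih =>
      intro n
      have hne : pvFixBits (k + 1) (n / 2) ≠ [] := by
        intro h
        have := pvFixBits_length (k + 1) (n / 2)
        rw [h] at this
        simp at this
      rw [show pvFixBits (k + 1 + 1) n = pvFixBits (k + 1) (n / 2) ++ [pvBitChar (n % 2)] from rfl,
        pvHeadD_append_of_ne_nil _ _ _ hne, ih]
      congr 1
      rw [Nat.div_div_eq_div_mul, pow_succ]
      ring_nf

theorem pvFoldlBin_fixBits (k : Nat) : ∀ n a : Nat, n < 2 ^ k →
    (pvFixBits k n).foldl (fun a c => a * 2 + (if c = '1' then 1 else 0)) a = a * 2 ^ k + n := by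
  induction k with
  | zero =>
      intro n a hn
      interval_cases n
      simp [pvFixBits]
  | succ k ih =>
      intro n a hn
      have hp : (2:Nat) ^ (k+1) = 2 * 2 ^ k := by rw [pow_succ]; ring
      rw [pvFixBits, List.foldl_append, ih (n / 2) a (by omega)]
      simp only [List.foldl_cons, List.foldl_nil]
      have hb : (if pvBitChar (n % 2) = '1' then 1 else 0) = n % 2 := by
        rcases Nat.mod_two_eq_zero_or_one n with h | h <;> rw [h] <;> simp [pvBitChar]
      rw [hb]
      have : a * 2 ^ (k + 1) = a * 2 ^ k * 2 := by rw [pow_succ]; ring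
      omega

theorem pvFoldlBin_replicate_one (e : Nat) : ∀ a : Nat,
    (List.replicate e '1').foldl (fun a c => a * 2 + (if c = '1' then 1 else 0)) a + 1
      = (a + 1) * 2 ^ e := by
  induction e with
  | zero => intro a; simp
  | succ e ih =>
      intro a
      have hone : (if ('1':Char) = '1' then (1:Nat) else 0) = 1 := if_pos rfl
      rw [List.replicate_succ, List.foldl_cons, ih, hone, pow_succ]
      ring

theorem pvFoldlBin_replicate_zero (e : Nat) : ∀ a : Nat,
    (List.replicate e '0').foldl (fun a c => a * 2 + (if c = '1' then 1 else 0)) a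
      = a * 2 ^ e := by
  induction e with
  | zero => intro a; simp
  | succ e ih =>
      intro a
      rw [List.replicate_succ, List.foldl_cons]
      simp only [show ('0' = '1') = False from by simp, if_false]
      rw [ih, pow_succ]
      ring

theorem pvFoldl_append_const (l : List Int) (c : Char) : ∀ acc : List Char,
    l.foldl (fun acc _ => acc ++ [c]) acc = acc ++ List.replicate l.length c := by
  induction l with
  | nil => intro acc; simp
  | cons x l ih =>
      intro acc
      rw [List.foldl_cons, ih, List.length_cons]
      simp [List.append_assoc, List.replicate_succ]

theorem sign_extend_main (value : String) (t : Int)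
    (hne : value.toList ≠ []) (hall : value.toList.all pvIsHexDig = true) :
    sign_extend value t = sign_extend_alt value t := by
  unfold sign_extend sign_extend_alt
  dsimp only
  set L := value.toList with hLdef
  set k := L.length with hkdef
  set N := pvParseHex L with hNdef
  have hk1 : 1 ≤ k := List.length_pos_of_ne_nil hne
  have h16 : (16:Nat) ^ k = 2 ^ (4 * k) := by
    rw [show (16:Nat) = 2 ^ 4 from rfl, ← pow_mul]
  have hNlt : N < 2 ^ (4 * k) := by rw [← h16]; exact pvParseHex_lt L hall
  -- int('1'+value, 16) = 2^(4k) + N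
  have hparse1 : pvParseHex ('1' :: L) = 2 ^ (4 * k) * 1 + N := by
    unfold pvParseHex
    rw [List.foldl_cons, pvParseHex_foldl]
    rw [show pvHexVal '1' = 1 from rfl, ← hkdef, h16, ← hNdef]
    ring
  -- bin(...)[3:] = pvFixBits (4k) N
  have hbin1 : pvBinGo 1 = ['1'] := by simp [pvBinGo, pvBitChar]
  have hbinval : (pvBin (pvParseHex ('1' :: L))).drop 3 = pvFixBits (4 * k) N := by
    rw [hparse1, pvBin, if_neg (by positivity), pvBinGo_spec (4 * k) 1 N one_pos hNlt, hbin1]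
    rfl
  rw [hbinval, pvFixBits_length]
  push_cast
  -- the top bit
  have htop : (pvFixBits (4 * k) N).headD '0' = pvBitChar (N / 2 ^ (4 * k - 1) % 2) := by
    rw [show 4 * k = (4 * k - 1) + 1 from by omega, pvFixBits_headD]
    simp
  rw [htop]
  -- the sign-extension loop builds a replicate
  rw [pvFoldl_append_const, PySem.List.length_pyRange_one, List.nil_append, sub_zero]
  -- B's sign bit is the same top bit
  have hsign : (N >>> (4 * (k:Int) - 1).toNat) &&& 1 = N / 2 ^ (4 * k - 1) % 2 := by
    rw [Nat.and_one_is_mod, Nat.shiftRight_eq_div_pow,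
      show ((4 * (k:Int) - 1).toNat) = 4 * k - 1 from by omega]
  rw [hsign]
  by_cases hgt : t - 4 * (k:Int) > 0
  · rw [if_pos hgt]
    -- the widths agree
    have hlen : ((List.replicate (t - 4 * (k:Int)).toNat (pvBitChar (N / 2 ^ (4 * k - 1) % 2))
        ++ pvFixBits (4 * k) N).length : Int) = t := by
      rw [List.length_append, List.length_replicate, pvFixBits_length]
      push_cast
      omega
    rcases Nat.mod_two_eq_zero_or_one (N / 2 ^ (4 * k - 1)) with hs | hs
    · -- top bit 0: zero-extension, value unchanged
      rw [hs] at hlen ⊢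
      have : pvParseBin (List.replicate (t - 4 * (k:Int)).toNat (pvBitChar 0) ++ pvFixBits (4 * k) N) = N := by
        unfold pvParseBin
        rw [show pvBitChar 0 = '0' from rfl, List.foldl_append, pvFoldlBin_replicate_zero,
          pvFoldlBin_fixBits (4 * k) N _ hNlt]
        ring
      rw [this, if_neg (by omega), hlen]
    · -- top bit 1: sign-extension block added
      rw [hs] at hlen ⊢
      have : pvParseBin (List.replicate (t - 4 * (k:Int)).toNat (pvBitChar 1) ++ pvFixBits (4 * k) N)
          = (2 ^ (t - 4 * (k:Int)).toNat - 1) * 2 ^ (4 * k) + N := by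
        unfold pvParseBin
        rw [show pvBitChar 1 = '1' from rfl, List.foldl_append,
          pvFoldlBin_fixBits (4 * k) N _ hNlt]
        have h2 : (1:Nat) ≤ 2 ^ (t - 4 * (k:Int)).toNat := Nat.one_le_two_pow
        have hrep := pvFoldlBin_replicate_one (t - 4 * (k:Int)).toNat 0
        have : List.foldl (fun a c => a * 2 + if c = '1' then 1 else 0) 0
            (List.replicate (t - 4 * (k:Int)).toNat '1') = 2 ^ (t - 4 * (k:Int)).toNat - 1 := by
          omega
        rw [this]
      rw [this, if_pos rfl, hlen]
      congr 1
      rw [Nat.one_shiftLeft, Nat.shiftLeft_eq]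
      have h4k : ((4 * (k:Int))).toNat = 4 * k := by omega
      rw [h4k]
      ring
  · rw [if_neg hgt]
    have he0 : (t - 4 * (k:Int)).toNat = 0 := by omega
    rw [he0, List.replicate_zero, List.nil_append]
    have : pvParseBin (pvFixBits (4 * k) N) = N := by
      unfold pvParseBin
      rw [pvFoldlBin_fixBits (4 * k) N _ hNlt]
      ring
    rw [this, pvFixBits_length]
    norm_cast

theorem sign_extend_spec : Claim_equal_sign_extend := by
  intro value total_bits _ hpre
  unfold Spec_sign_extend
  exact sign_extend_main value total_bits hpre.1 hpre.2
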